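-- pv_equiv track=rewrite | github.com/merklescience/dataengineering | dataengineering/clickhouse/v1/utils.py | _YYYY_MM
-- ===== SOURCE A (Python) =====
-- def _YYYY_MM(start_year):
--     end_year = 2023
--     partitions = []
--     for year in range(start_year, end_year):
--         for month in range(1, 13):
--             if month < 10:
--                 month_str = '0' + str(month)
--             else:
--                 month_str = str(month)
--             partitions.append(str(year) + month_str)
--
--     return partitions
-- ===== SOURCE B (Python) =====
-- def _YYYY_MM(start_year):
--     total = (2023 - start_year) * 12
--     return [str(start_year + i // 12) + str(i % 12 + 1).zfill(2)
--             for i in range(total)]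
-- ===== Notes on version B (the rewrite author's own statement) =====
-- stated objective: alternative
-- what changed: Replaces the nested year/month loops and the explicit '0'-prefix branch with a single comprehension over a flat month counter, recovering year and month via // and % and padding with zfill.
import Mathlib
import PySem

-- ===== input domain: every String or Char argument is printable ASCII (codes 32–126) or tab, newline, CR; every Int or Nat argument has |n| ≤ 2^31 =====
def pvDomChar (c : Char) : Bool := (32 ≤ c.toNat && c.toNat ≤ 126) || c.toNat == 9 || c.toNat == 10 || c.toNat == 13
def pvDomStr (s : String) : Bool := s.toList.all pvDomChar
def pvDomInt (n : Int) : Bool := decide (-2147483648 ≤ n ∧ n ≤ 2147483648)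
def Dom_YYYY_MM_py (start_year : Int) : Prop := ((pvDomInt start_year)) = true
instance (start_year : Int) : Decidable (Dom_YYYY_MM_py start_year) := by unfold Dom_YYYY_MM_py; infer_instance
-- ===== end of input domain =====

-- B replaces the nested year/month loops and the '0'-prefix branch by one flat
-- month counter decomposed with // and % and padded with zfill (alternative decomposition, same cost).

-- ===== PORT A =====
def YYYY_MM_py (start_year : Int) : List String :=
  let end_year : Int := 2023
  let partitions : List String := []
  (PySem.List.pyRange start_year end_year 1).foldl (fun partitions year =>
    (PySem.List.pyRange 1 13 1).foldl (fun partitions month =>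
      let month_str := if month < 10 then "0" ++ PySem.Int.toStr month else PySem.Int.toStr month
      partitions ++ [PySem.Int.toStr year ++ month_str]) partitions) partitions

-- ===== PORT B =====
def YYYY_MM_py_alt (start_year : Int) : List String :=
  let total := (2023 - start_year) * 12
  (PySem.List.pyRange 0 total 1).map (fun i =>
    PySem.Int.toStr (start_year + PySem.Int.floordiv i 12) ++
      PySem.Str.zfill (PySem.Int.toStr (PySem.Int.mod i 12 + 1)) 2)

-- ===== PRECONDITION & SPEC =====
def Spec_YYYY_MM_py (start_year : Int) (out : List String) : Prop := out = YYYY_MM_py_alt start_year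
instance (start_year : Int) (out : List String) : Decidable (Spec_YYYY_MM_py start_year out) := by unfold Spec_YYYY_MM_py; infer_instance

-- ===== CLAIM (what is proved, stated in full; the proofs are below) =====
def Claim_equal_YYYY_MM_py : Prop := ∀ (start_year : Int), Dom_YYYY_MM_py start_year → Spec_YYYY_MM_py start_year (YYYY_MM_py start_year)

-- ===== LEMMAS AND PROOFS =====

-- one year's 12 entries, as A produces them
def pvBlock (y : Int) : List String :=
  (PySem.List.pyRange 1 13 1).map (fun month =>
    PySem.Int.toStr y ++ if month < 10 then "0" ++ PySem.Int.toStr month else PySem.Int.toStr month)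

-- B's entry builder
def pvEntry (y0 i : Int) : String :=
  PySem.Int.toStr (y0 + PySem.Int.floordiv i 12) ++
    PySem.Str.zfill (PySem.Int.toStr (PySem.Int.mod i 12 + 1)) 2

lemma pvA_eq_flatMap (a : Int) :
    YYYY_MM_py a = (PySem.List.pyRange a 2023 1).flatMap pvBlock := by
  simp only [YYYY_MM_py]
  have h := PySem.List.foldl_append_eq_flatMap (g := pvBlock)
    (l := PySem.List.pyRange a 2023 1) (acc := ([] : List String))
  rw [List.nil_append] at h
  rw [← h]
  apply PySem.List.foldl_congr_mem
  intro acc y _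
  simp only [PySem.List.foldl_append_singleton_eq_map, pvBlock]

lemma pvEntry_mon (y0 m c : Int) (h0 : 0 ≤ c) (h1 : c < 12) :
    pvEntry y0 (12 * m + c) =
      PySem.Int.toStr (y0 + m) ++
        (if c + 1 < 10 then "0" ++ PySem.Int.toStr (c + 1) else PySem.Int.toStr (c + 1)) := by
  unfold pvEntry
  rw [PySem.Int.floordiv_eq_ediv_of_pos (by norm_num), PySem.Int.mod_eq_emod_of_pos (by norm_num)]
  have hd : (12 * m + c) / 12 = m := by omega
  have hm : (12 * m + c) % 12 = c := by omega
  rw [hd, hm]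
  congr 1
  interval_cases c <;> decide

lemma pvBlock_eq (y0 m : Int) :
    (PySem.List.pyRange (12 * m) (12 * m + 12) 1).map (pvEntry y0) = pvBlock (y0 + m) := by
  unfold pvBlock
  apply List.ext_getElem
  · simp [PySem.List.length_pyRange_one]
  · intro k h1 h2
    have hk : k < 12 := by
      simpa [PySem.List.length_pyRange_one] using h1
    simp only [List.getElem_map, PySem.List.getElem_pyRange_one]
    rw [pvEntry_mon y0 m (k : Int) (by omega) (by omega)]
    have : (1 : Int) + (k : Int) = (k : Int) + 1 := by ring
    rw [this]

lemma pvMain (n : ℕ) (y0 : Int) :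
    (PySem.List.pyRange y0 (y0 + (n : Int)) 1).flatMap pvBlock =
      (PySem.List.pyRange 0 (12 * (n : Int)) 1).map (pvEntry y0) := by
  induction n with
  | zero =>
    rw [PySem.List.pyRange_one_eq_nil (by simp), PySem.List.pyRange_one_eq_nil (by simp)]
    simp
  | succ m ih =>
    have hy : PySem.List.pyRange y0 (y0 + ((m + 1 : ℕ) : Int)) 1
        = PySem.List.pyRange y0 (y0 + (m : Int)) 1 ++ [y0 + (m : Int)] := by
      have h := PySem.List.pyRange_one_succ_right (a := y0) (b := y0 + (m : Int)) (by omega)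
      rw [← h]; congr 1; push_cast; ring
    have hm : PySem.List.pyRange 0 (12 * ((m + 1 : ℕ) : Int)) 1
        = PySem.List.pyRange 0 (12 * (m : Int)) 1
          ++ PySem.List.pyRange (12 * (m : Int)) (12 * (m : Int) + 12) 1 := by
      have h12 : 12 * ((m + 1 : ℕ) : Int) = 12 * (m : Int) + 12 := by push_cast; ring
      rw [h12]
      exact PySem.List.pyRange_one_append 0 (12 * (m : Int)) (12 * (m : Int) + 12)
        (by omega) (by omega)
    rw [hy, hm, List.flatMap_append, List.map_append, ih]
    have hs : List.flatMap pvBlock [y0 + (m : Int)] = pvBlock (y0 + (m : Int)) := by simp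
    rw [hs, ← pvBlock_eq y0 (m : Int)]

theorem YYYY_MM_py_spec : Claim_equal_YYYY_MM_py := by
  intro a _
  unfold Spec_YYYY_MM_py YYYY_MM_py_alt
  simp only
  rw [pvA_eq_flatMap]
  by_cases h : a < 2023
  · set n : ℕ := (2023 - a).toNat with hn
    have h2023 : (2023 : Int) = a + (n : Int) := by omega
    rw [h2023, show (a + (n : Int) - a) * 12 = 12 * (n : Int) by ring, pvMain n a]
    rfl
  · rw [PySem.List.pyRange_one_eq_nil (by omega), PySem.List.pyRange_one_eq_nil (by nlinarith)]
    simp
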